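-- pv_equiv track=rewrite | github.com/TilenKelc/vaje_10_UvR | covid19.py | korakov_do_vseh
-- ===== SOURCE A (Python) =====
-- def korakov_do_vseh(skupine, prvi):
--
--     zenske = skupine.copy()
--     okuzeni = {prvi}
--     korak = 0
--     dolzina = 0
--
--     while zenske:
--         if len(zenske) != dolzina:
--             dolzina = len(zenske)
--         else:
--             return None
--
--         korak += 1
--         okuzene_skupine_zensk = []
--
--         for skupina in zenske[::-1]:
--             for oseba in skupina:
--                 if oseba in okuzeni:
--                     okuzene_skupine_zensk.append(skupina)
--                     zenske.remove(skupina)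
--                     break
--
--         for skupina in okuzene_skupine_zensk:
--             okuzeni.update(skupina)
--
--     return korak
-- ===== SOURCE B (Python) =====
-- def korakov_do_vseh(skupine, prvi):
--     # BFS by layers: index person -> group indices once, then expand a frontier
--     # of newly infected people, layer by layer.
--     oseba_skupine = {}
--     for i, skupina in enumerate(skupine):
--         for oseba in skupina:
--             oseba_skupine.setdefault(oseba, []).append(i)
--
--     okuzeni = {prvi}
--     fronta = [prvi]
--     obiskane = set()
--     preostalo = len(skupine)
--     korak = 0
--
--     while preostalo:
--         nove = []
--         for oseba in fronta:
--             for i in oseba_skupine.get(oseba, []):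
--                 if i not in obiskane:
--                     obiskane.add(i)
--                     nove.append(i)
--         if not nove:
--             return None
--         korak += 1
--         preostalo -= len(nove)
--         fronta = []
--         for i in nove:
--             for oseba in skupine[i]:
--                 if oseba not in okuzeni:
--                     okuzeni.add(oseba)
--                     fronta.append(oseba)
--     return korak
-- ===== Notes on version B (the rewrite author's own statement) =====
-- stated objective: alternative
-- what changed: Instead of rescanning and mutating the whole remaining group list against the full infected set every step, B builds a person-to-group-indices index once and runs a layered BFS over a frontier of newly infected people, touching each group via the index instead of repeated list scans.
import Mathlib
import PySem

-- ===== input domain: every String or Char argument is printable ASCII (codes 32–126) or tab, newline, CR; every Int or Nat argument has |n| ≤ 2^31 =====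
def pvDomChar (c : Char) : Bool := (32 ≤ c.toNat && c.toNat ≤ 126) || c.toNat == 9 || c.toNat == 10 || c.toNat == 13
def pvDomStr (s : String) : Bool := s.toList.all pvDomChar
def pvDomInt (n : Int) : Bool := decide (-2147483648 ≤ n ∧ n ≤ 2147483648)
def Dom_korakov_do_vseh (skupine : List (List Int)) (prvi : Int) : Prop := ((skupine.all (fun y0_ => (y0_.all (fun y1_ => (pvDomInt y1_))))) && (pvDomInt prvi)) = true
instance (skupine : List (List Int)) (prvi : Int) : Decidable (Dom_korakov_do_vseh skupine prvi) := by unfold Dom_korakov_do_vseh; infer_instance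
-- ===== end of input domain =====

-- B replaces A's repeated rescans of the whole remaining group list by a one-off
-- person→group-indices index and a layered frontier BFS (objective: alternative algorithm).

-- ===== PORT A =====
-- the scan 'for skupina in zenske[::-1]: for oseba in skupina: if oseba in okuzeni:
-- append; zenske.remove(skupina); break' — the inner for/break fires iff some member
-- is in okuzeni, with the append+remove as its one effect; state = (zenske, okuzene_skupine_zensk)
def aScan (okuzeni : PySem.Set Int) (zenske : List (List Int)) : List (List Int) × List (List Int) :=
  ((PySem.List.slice? zenske none none (-1)).getD []).foldl
    (fun st skupina =>
      if skupina.any (fun oseba => PySem.Set.contains okuzeni oseba) then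
        ((PySem.List.remove? st.1 skupina).getD st.1, st.2 ++ [skupina])
      else st)
    (zenske, [])

-- cited by aLoop's termination proof
theorem aScan_fst_length_le (okuzeni : PySem.Set Int) (zenske : List (List Int)) :
    (aScan okuzeni zenske).1.length ≤ zenske.length := by
  unfold aScan
  have main : ∀ (w : List (List Int)) (st : List (List Int) × List (List Int)),
      ((w.foldl (fun st skupina =>
        if skupina.any (fun oseba => PySem.Set.contains okuzeni oseba) then
          ((PySem.List.remove? st.1 skupina).getD st.1, st.2 ++ [skupina])
        else st) st).1).length ≤ st.1.length := by
    intro w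
    induction w with
    | nil => intro st; simp
    | cons g t ih =>
      intro st
      simp only [List.foldl_cons]
      refine le_trans (ih _) ?_
      split
      · cases h : PySem.List.remove? st.1 g with
        | none => simp
        | some r =>
          simp only [Option.getD_some]
          simp only [PySem.List.remove?, Option.map_eq_some_iff] at h
          rcases h with ⟨i, _, rfl⟩
          exact List.length_eraseIdx_le _ _
      · exact le_refl _
  exact le_trans (main _ _) (le_refl _)

-- the while loop; python returns None when the length stopped shrinking (len == dolzina)
def aLoop (zenske : List (List Int)) (okuzeni : PySem.Set Int) (korak : Int) (dolzina : Int) : Option Int :=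
  if zenske = [] then some korak
  else if (zenske.length : Int) ≠ dolzina then
    aLoop (aScan okuzeni zenske).1
      ((aScan okuzeni zenske).2.foldl (fun s skupina => PySem.Set.update s skupina) okuzeni)
      (korak + 1) (zenske.length : Int)
  else none
termination_by zenske.length + (if (zenske.length : Int) = dolzina then 0 else 1)
decreasing_by
  have hle := aScan_fst_length_le okuzeni zenske
  split_ifs with h1 h2 <;> omega

def korakov_do_vseh (skupine : List (List Int)) (prvi : Int) : Option Int :=
  aLoop skupine (PySem.Set.ofList [prvi]) 0 0

-- ===== PORT B =====
-- oseba_skupine: for i, skupina in enumerate(skupine): for oseba in skupina: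
--   oseba_skupine.setdefault(oseba, []).append(i)   (= modify with default [])
def bIndex (skupine : List (List Int)) : PySem.Dict Int (List Int) :=
  (PySem.List.enumerate skupine 0).foldl
    (fun d q => q.2.foldl (fun d oseba => d.modify oseba [] (fun l => l ++ [q.1])) d)
    PySem.Dict.empty

-- nove collection: for oseba in fronta: for i in oseba_skupine.get(oseba, []):
--   if i not in obiskane: obiskane.add(i); nove.append(i)
def bCollect (d : PySem.Dict Int (List Int)) (fronta : List Int) (obiskane : PySem.Set Int) :
    PySem.Set Int × List Int :=
  fronta.foldl
    (fun st oseba =>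
      (d.getD oseba []).foldl
        (fun (st : PySem.Set Int × List Int) i =>
          if PySem.Set.contains st.1 i then st
          else (PySem.Set.add st.1 i, st.2 ++ [i]))
        st)
    (obiskane, [])

-- spreading: for i in nove: for oseba in skupine[i]:
--   if oseba not in okuzeni: okuzeni.add(oseba); fronta.append(oseba)
def bSpread (skupine : List (List Int)) (okuzeni : PySem.Set Int) (nove : List Int) :
    PySem.Set Int × List Int :=
  nove.foldl
    (fun st i =>
      (PySem.List.pyGetD skupine i []).foldl
        (fun (st : PySem.Set Int × List Int) oseba =>
          if PySem.Set.contains st.1 oseba then st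
          else (PySem.Set.add st.1 oseba, st.2 ++ [oseba]))
        st)
    (okuzeni, [])

-- 'while preostalo:' — preostalo is a count of not yet infected groups, kept as Nat
def bLoop (skupine : List (List Int)) (d : PySem.Dict Int (List Int)) (preostalo : Nat)
    (okuzeni : PySem.Set Int) (fronta : List Int) (obiskane : PySem.Set Int) (korak : Int) :
    Option Int :=
  if preostalo = 0 then some korak
  else if hc : (bCollect d fronta obiskane).2 = [] then none
  else
    bLoop skupine d (preostalo - (bCollect d fronta obiskane).2.length)
      (bSpread skupine okuzeni (bCollect d fronta obiskane).2).1
      (bSpread skupine okuzeni (bCollect d fronta obiskane).2).2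
      (bCollect d fronta obiskane).1 (korak + 1)
termination_by preostalo
decreasing_by
  have h1 : (bCollect d fronta obiskane).2.length ≠ 0 := by
    simpa using (List.length_pos_of_ne_nil hc).ne'
  omega

def korakov_do_vseh_alt (skupine : List (List Int)) (prvi : Int) : Option Int :=
  bLoop skupine (bIndex skupine) skupine.length (PySem.Set.ofList [prvi]) [prvi] PySem.Set.empty 0

-- ===== PRECONDITION & SPEC =====
def Spec_korakov_do_vseh (skupine : List (List Int)) (prvi : Int) (out : Option Int) : Prop := out = korakov_do_vseh_alt skupine prvi
instance (skupine : List (List Int)) (prvi : Int) (out : Option Int) : Decidable (Spec_korakov_do_vseh skupine prvi out) := by unfold Spec_korakov_do_vseh; infer_instance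

-- ===== CLAIM (what is proved, stated in full; the proofs are below) =====
def Claim_equal_korakov_do_vseh : Prop := ∀ (skupine : List (List Int)) (prvi : Int), Dom_korakov_do_vseh skupine prvi → Spec_korakov_do_vseh skupine prvi (korakov_do_vseh skupine prvi)

-- ===== LEMMAS AND PROOFS =====

-- reference function both ports are reduced to: one BFS layer = drop the groups that
-- meet S, add their members to S, count the layer
def hitsB (S : List Int) (g : List Int) : Bool := g.any (fun o => PySem.Set.contains S o)

def ref (rem : List (List Int)) (S : List Int) (k : Int) : Option Int :=
  if rem = [] then some k
  else if rem.filter (hitsB S) = [] then none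
  else ref (rem.filter (fun g => !hitsB S g))
           ((rem.filter (hitsB S)).foldl (fun s g => PySem.Set.update s g) S) (k + 1)
termination_by rem.length
decreasing_by
  rename_i h1 h2
  simp only [List.unattach_filter] at h2 ⊢
  rcases List.exists_mem_of_ne_nil _ h2 with ⟨g, hg⟩
  have hm := List.mem_filter.mp hg
  simp
  exact ⟨g, by simpa using hm.1, hm.2⟩


-- ---- generic small list lemmas ----

theorem removeD_eq_erase (l : List (List Int)) (v : List Int) :
    (PySem.List.remove? l v).getD l = l.erase v := by
  simp only [PySem.List.remove?]
  induction l with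
  | nil => simp
  | cons a t ih =>
    by_cases h : v = a
    · subst h; simp [List.idxOf?_cons]
    · simp only [List.idxOf?_cons, beq_iff_eq, Ne.symm h, if_false]
      cases hh : List.idxOf? v t with
      | none => simp [hh] at ih ⊢; simpa [(by simpa [beq_iff_eq] using Ne.symm h : (a == v) = false)] using ih
      | some k => simp [hh] at ih ⊢; simp [List.erase_cons, (by simpa [beq_iff_eq] using Ne.symm h : (a == v) = false), ih]

-- repeatedly erasing (one occurrence each of) the p-elements of z leaves the non-p elements
theorem foldl_erase_filter (p : List Int → Bool) :
    ∀ (w z : List (List Int)), w.Perm (z.filter p) →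
      w.foldl List.erase z = z.filter (fun g => !p g) := by
  intro w
  induction w with
  | nil =>
    intro z hperm
    have hnil : z.filter p = [] := (List.Perm.nil_eq hperm).symm
    have : ∀ g ∈ z, ¬ p g = true := by
      intro g hg hpg
      have : g ∈ z.filter p := List.mem_filter.mpr ⟨hg, hpg⟩
      simp [hnil] at this
    simp only [List.foldl_nil]
    rw [List.filter_eq_self.mpr]
    intro g hg
    simp [this g hg]
  | cons g t ih =>
    intro z hperm
    have hgmem : g ∈ z.filter p := hperm.mem_iff.mp (List.mem_cons_self ..)
    have hpg : p g = true := (List.mem_filter.mp hgmem).2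
    have hperm' : t.Perm ((z.filter p).erase g) :=
      (List.cons_perm_iff_perm_erase.mp hperm).2
    have h1 : (z.filter p).erase g = (z.erase g).filter p := List.erase_filter
    have h2 : (z.erase g).filter (fun x => !p x) = z.filter (fun x => !p x) := by
      rw [← List.erase_filter]
      exact List.erase_of_not_mem (by simp [hpg])
    simp only [List.foldl_cons]
    rw [ih (z.erase g) (h1 ▸ hperm'), h2]

-- a pair-fold whose first component ignores the second and whose second appends the hits
theorem foldl_pair_split (p : List Int → Bool) (f : List (List Int) → List Int → List (List Int))
    (w : List (List Int)) :
    ∀ (c : List (List Int)) (a : List (List Int)),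
      w.foldl (fun st g => if p g then (f st.1 g, st.2 ++ [g]) else st) (c, a)
        = ((w.filter p).foldl f c, a ++ w.filter p) := by
  induction w with
  | nil => intro c a; simp
  | cons g t ih =>
    intro c a
    by_cases h : p g <;> simp [List.filter_cons, h, ih]

theorem aScan_eq (S : PySem.Set Int) (z : List (List Int)) :
    aScan S z = (z.filter (fun g => !hitsB S g), (z.filter (hitsB S)).reverse) := by
  unfold aScan
  rw [PySem.List.slice?_none_none_neg_one]
  simp only [Option.getD_some]
  rw [List.foldl_ext _ (fun (st : List (List Int) × List (List Int)) g =>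
        if hitsB S g then (st.1.erase g, st.2 ++ [g]) else st)
      (z, ([] : List (List Int)))
      (by intro st g _; unfold hitsB; rw [removeD_eq_erase])]
  rw [foldl_pair_split (hitsB S) (fun c g => c.erase g) z.reverse]
  rw [List.filter_reverse, Prod.mk.injEq]
  constructor
  · exact foldl_erase_filter (hitsB S) _ z (List.reverse_perm _)
  · simp

theorem mem_foldl_update (l : List (List Int)) (S : List Int) (x : Int) :
    x ∈ l.foldl (fun s g => PySem.Set.update s g) S ↔ x ∈ S ∨ ∃ g ∈ l, x ∈ g := by
  induction l generalizing S with
  | nil => simp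
  | cons g t ih =>
    simp only [List.foldl_cons, ih, PySem.Set.mem_update]
    constructor
    · rintro ((h | h) | ⟨g', hg', hx⟩)
      · exact Or.inl h
      · exact Or.inr ⟨g, by simp, h⟩
      · exact Or.inr ⟨g', by simp [hg'], hx⟩
    · rintro (h | ⟨g', hg', hx⟩)
      · exact Or.inl (Or.inl h)
      · rcases List.mem_cons.mp hg' with rfl | hg'
        · exact Or.inl (Or.inr hx)
        · exact Or.inr ⟨g', hg', hx⟩

theorem ref_nil (S : List Int) (k : Int) : ref [] S k = some k := by
  rw [ref]; simp

theorem ref_stuck (rem : List (List Int)) (S : List Int) (k : Int) (hne : rem ≠ [])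
    (h : rem.filter (hitsB S) = []) : ref rem S k = none := by
  rw [ref, if_neg hne, if_pos h]

theorem ref_step (rem : List (List Int)) (S : List Int) (k : Int) (hne : rem ≠ [])
    (hh : rem.filter (hitsB S) ≠ []) :
    ref rem S k = ref (rem.filter (fun g => !hitsB S g))
      ((rem.filter (hitsB S)).foldl (fun s g => PySem.Set.update s g) S) (k + 1) := by
  conv_lhs => rw [ref]
  rw [if_neg hne, if_neg hh]

theorem hitsB_congr (S S' : List Int) (h : ∀ x : Int, x ∈ S ↔ x ∈ S') (g : List Int) :
    hitsB S g = hitsB S' g := by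
  unfold hitsB
  cases hh : g.any fun o => PySem.Set.contains S' o with
  | true =>
    rcases List.any_eq_true.mp hh with ⟨o, ho, hc⟩
    exact List.any_eq_true.mpr ⟨o, ho, by
      rw [PySem.Set.contains_iff] at hc ⊢; exact (h o).mpr hc⟩
  | false =>
    simp only [List.any_eq_false] at hh ⊢
    intro o ho hc
    rw [PySem.Set.contains_iff] at hc
    exact hh o ho (by rw [PySem.Set.contains_iff]; exact (h o).mp hc)

theorem ref_congr (rem : List (List Int)) (S S' : List Int) (k : Int)
    (h : ∀ x : Int, x ∈ S ↔ x ∈ S') : ref rem S k = ref rem S' k := by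
  have aux : ∀ (n : Nat) (rem : List (List Int)) (S S' : List Int) (k : Int),
      rem.length ≤ n → (∀ x : Int, x ∈ S ↔ x ∈ S') → ref rem S k = ref rem S' k := by
    intro n
    induction n with
    | zero =>
      intro rem S S' k hle hm
      have : rem = [] := List.eq_nil_of_length_eq_zero (Nat.le_zero.mp hle)
      subst this
      rw [ref_nil, ref_nil]
    | succ n ih =>
      intro rem S S' k hle hm
      have hfil : rem.filter (hitsB S) = rem.filter (hitsB S') :=
        List.filter_congr (fun g _ => hitsB_congr S S' hm g)
      have hfil' : rem.filter (fun g => !hitsB S g) = rem.filter (fun g => !hitsB S' g) :=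
        List.filter_congr (fun g _ => by rw [hitsB_congr S S' hm g])
      rcases eq_or_ne rem [] with rfl | hne
      · rw [ref_nil, ref_nil]
      · rcases eq_or_ne (rem.filter (hitsB S)) [] with hh | hh
        · rw [ref_stuck _ _ _ hne hh, ref_stuck _ _ _ hne (hfil ▸ hh)]
        · rw [ref_step _ _ _ hne hh, ref_step _ _ _ hne (hfil ▸ hh), ← hfil, ← hfil']
          have hlt : (rem.filter (fun g => !hitsB S g)).length < rem.length := by
            apply List.length_filter_lt_length_iff_exists.mpr
            rcases List.exists_mem_of_ne_nil _ hh with ⟨g, hg⟩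
            have := List.mem_filter.mp hg
            exact ⟨g, this.1, by simp [this.2]⟩
          apply ih _ _ _ _ (by omega)
          intro x
          rw [mem_foldl_update, mem_foldl_update]
          constructor
          · rintro (h | h)
            · exact Or.inl ((hm x).mp h)
            · exact Or.inr h
          · rintro (h | h)
            · exact Or.inl ((hm x).mpr h)
            · exact Or.inr h
  exact aux rem.length rem S S' k le_rfl h

-- ---- A = ref ----

theorem aLoop_eq_ref (n : Nat) :
    ∀ (z : List (List Int)) (S : PySem.Set Int) (k d : Int), z.length ≤ n →
      ((z.length : Int) ≠ d ∨ z = []) → aLoop z S k d = ref z S k := by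
  induction n with
  | zero =>
    intro z S k d hle _
    have : z = [] := List.eq_nil_of_length_eq_zero (Nat.le_zero.mp hle)
    subst this
    rw [aLoop, ref_nil]; simp
  | succ n ih =>
    intro z S k d hle hcond
    rcases eq_or_ne z [] with rfl | hz
    · rw [aLoop, ref_nil]; simp
    · have hd : (z.length : Int) ≠ d := hcond.resolve_right hz
      conv_lhs => rw [aLoop]
      rw [if_neg hz, if_pos hd]
      rcases eq_or_ne (z.filter (hitsB S)) [] with hhit | hhit
      · rw [ref_stuck _ _ _ hz hhit]
        have hall : ∀ g ∈ z, ¬ hitsB S g = true := by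
          intro g hg hpg
          have : g ∈ z.filter (hitsB S) := List.mem_filter.mpr ⟨hg, hpg⟩
          simp [hhit] at this
        have hid : z.filter (fun g => !hitsB S g) = z :=
          List.filter_eq_self.mpr (by intro g hg; simp [hall g hg])
        rw [aScan_eq]
        simp only [hhit, List.reverse_nil, List.foldl_nil, hid]
        rw [aLoop]
        simp [hz]
      · rw [ref_step _ _ _ hz hhit]
        have hlt : (z.filter (fun g => !hitsB S g)).length < z.length := by
          apply List.length_filter_lt_length_iff_exists.mpr
          rcases List.exists_mem_of_ne_nil _ hhit with ⟨g, hg⟩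
          have := List.mem_filter.mp hg
          exact ⟨g, this.1, by simp [this.2]⟩
        rw [aScan_eq]
        simp only
        rw [ih _ _ _ _ (by omega)
            (Or.inl (by exact_mod_cast hlt.ne))]
        apply ref_congr
        intro x
        rw [mem_foldl_update, mem_foldl_update]
        simp only [List.mem_reverse]

-- ---- B = ref ----

-- the common shape of bCollect and bSpread: append the not-yet-seen elements of the
-- h-image of w to the accumulator, tracking seen-ness in the first component
def sweep (h : Int → List Int) (st : PySem.Set Int × List Int) (w : List Int) :
    PySem.Set Int × List Int :=
  w.foldl (fun st x =>
    (h x).foldl (fun (st : PySem.Set Int × List Int) y =>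
      if PySem.Set.contains st.1 y then st
      else (PySem.Set.add st.1 y, st.2 ++ [y])) st) st

theorem bCollect_eq_sweep (d : PySem.Dict Int (List Int)) (fronta : List Int)
    (obiskane : PySem.Set Int) :
    bCollect d fronta obiskane = sweep (fun o => d.getD o []) (obiskane, []) fronta := rfl

theorem bSpread_eq_sweep (skupine : List (List Int)) (okuzeni : PySem.Set Int)
    (nove : List Int) :
    bSpread skupine okuzeni nove
      = sweep (fun i => PySem.List.pyGetD skupine i []) (okuzeni, []) nove := rfl

theorem sweep_inner (js : List Int) :
    ∀ (base : List Int) (st : PySem.Set Int × List Int), st.1 = base ++ st.2 →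
      (js.foldl (fun (st : PySem.Set Int × List Int) y =>
          if PySem.Set.contains st.1 y then st
          else (PySem.Set.add st.1 y, st.2 ++ [y])) st).1
        = base ++ (js.foldl (fun (st : PySem.Set Int × List Int) y =>
          if PySem.Set.contains st.1 y then st
          else (PySem.Set.add st.1 y, st.2 ++ [y])) st).2
      ∧ (∀ y : Int, y ∈ (js.foldl (fun (st : PySem.Set Int × List Int) y =>
          if PySem.Set.contains st.1 y then st
          else (PySem.Set.add st.1 y, st.2 ++ [y])) st).2
            ↔ y ∈ st.2 ∨ (y ∉ base ∧ y ∈ js))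
      ∧ (st.1.Nodup → (js.foldl (fun (st : PySem.Set Int × List Int) y =>
          if PySem.Set.contains st.1 y then st
          else (PySem.Set.add st.1 y, st.2 ++ [y])) st).1.Nodup) := by
  induction js with
  | nil => intro base st h; simp [h]
  | cons y0 t ih =>
    intro base st h
    simp only [List.foldl_cons]
    cases hc : PySem.Set.contains st.1 y0 with
    | true =>
      rw [if_pos rfl]
      obtain ⟨h1, h2, h3⟩ := ih base st h
      refine ⟨h1, ?_, h3⟩
      intro y
      rw [h2 y]
      constructor
      · rintro (hy | ⟨hyb, hyt⟩)
        · exact Or.inl hy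
        · exact Or.inr ⟨hyb, List.mem_cons_of_mem _ hyt⟩
      · rintro (hy | ⟨hyb, hyt⟩)
        · exact Or.inl hy
        · rcases List.mem_cons.mp hyt with rfl | hyt
          · -- y = y0 : y0 ∈ st.1 = base ++ st.2, y ∉ base ⇒ y ∈ st.2
            have : y ∈ st.1 := (PySem.Set.contains_iff _ _).mp hc
            rw [h] at this
            rcases List.mem_append.mp this with hb | hb
            · exact absurd hb hyb
            · exact Or.inl hb
          · exact Or.inr ⟨hyb, hyt⟩
    | false =>
      rw [if_neg (by simp [hc])]
      have hy0 : y0 ∉ st.1 := by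
        intro hmem
        rw [(PySem.Set.contains_iff _ _).mpr hmem] at hc
        cases hc
      have hadd : PySem.Set.add st.1 y0 = st.1 ++ [y0] := PySem.Set.add_of_not_mem hy0
      obtain ⟨h1, h2, h3⟩ := ih base (PySem.Set.add st.1 y0, st.2 ++ [y0])
        (by rw [hadd, h, List.append_assoc])
      refine ⟨h1, ?_, fun hnd => h3 ?_⟩
      · intro y
        rw [h2 y]
        have hy0b : y0 ∉ base := fun hb => hy0 (h ▸ List.mem_append.mpr (Or.inl hb))
        have hsplit : y ∈ st.2 ++ [y0] ↔ y ∈ st.2 ∨ y = y0 := by simp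
        rw [hsplit, List.mem_cons]
        by_cases hyy : y = y0
        · subst hyy; tauto
        · tauto
      · rw [hadd]
        refine List.Nodup.append hnd (List.nodup_singleton _) ?_
        intro a ha hb
        simp only [List.mem_singleton] at hb
        exact hy0 (hb ▸ ha)

theorem sweep_spec (h : Int → List Int) :
    ∀ (w : List Int) (base : List Int) (st : PySem.Set Int × List Int),
      st.1 = base ++ st.2 →
      (sweep h st w).1 = base ++ (sweep h st w).2
      ∧ (∀ y : Int, y ∈ (sweep h st w).2 ↔ y ∈ st.2 ∨ (y ∉ base ∧ ∃ x ∈ w, y ∈ h x))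
      ∧ (st.1.Nodup → (sweep h st w).1.Nodup) := by
  intro w
  induction w with
  | nil => intro base st hst; simp [sweep, hst]
  | cons x0 t ih =>
    intro base st hst
    unfold sweep
    simp only [List.foldl_cons]
    obtain ⟨h1, h2, h3⟩ := sweep_inner (h x0) base st hst
    obtain ⟨g1, g2, g3⟩ := ih base _ h1
    refine ⟨g1, ?_, fun hnd => g3 (h3 hnd)⟩
    intro y
    unfold sweep at g2
    rw [g2 y, h2 y]
    constructor
    · rintro ((hy | ⟨hyb, hyh⟩) | ⟨hyb, x, hx, hyh⟩)
      · exact Or.inl hy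
      · exact Or.inr ⟨hyb, x0, List.mem_cons_self .., hyh⟩
      · exact Or.inr ⟨hyb, x, List.mem_cons_of_mem _ hx, hyh⟩
    · rintro (hy | ⟨hyb, x, hx, hyh⟩)
      · exact Or.inl (Or.inl hy)
      · rcases List.mem_cons.mp hx with rfl | hx
        · exact Or.inl (Or.inr ⟨hyb, hyh⟩)
        · exact Or.inr ⟨hyb, x, hx, hyh⟩

-- the index dict: indices listed per person are exactly the enumerate pairs containing it
theorem bIndex_getD (skupine : List (List Int)) (p : Int) :
    (bIndex skupine).getD p []
      = (((PySem.List.enumerate skupine 0).flatMap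
            (fun q => q.2.map (fun o => (o, q.1)))).filter (fun r => r.1 == p)).map (·.2) := by
  have hb : bIndex skupine
      = ((PySem.List.enumerate skupine 0).flatMap
          (fun q => q.2.map (fun o => (o, q.1)))).foldl
            (fun d r => d.modify r.1 [] (fun l => l ++ [r.2])) PySem.Dict.empty := by
    rw [List.foldl_flatMap]
    simp only [List.foldl_map]
    rfl
  rw [hb, PySem.Dict.getD_foldl_modify_append]
  simp

theorem mem_bIndex_getD (skupine : List (List Int)) (p i : Int) :
    i ∈ (bIndex skupine).getD p []
      ↔ ∃ q ∈ PySem.List.enumerate skupine 0, p ∈ q.2 ∧ i = q.1 := by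
  rw [bIndex_getD]
  simp only [List.mem_map, List.mem_filter, List.mem_flatMap, beq_iff_eq]
  constructor
  · rintro ⟨r, ⟨⟨q, hq, ⟨o, ho, rfl⟩⟩, hr⟩, rfl⟩
    simp only at hr
    exact ⟨q, hq, hr ▸ ho, rfl⟩
  · rintro ⟨q, hq, hp, rfl⟩
    exact ⟨(p, q.1), ⟨⟨q, hq, ⟨p, hp, rfl⟩⟩, rfl⟩, rfl⟩

-- the not-yet-infected groups, with their indices
def unusedP (skupine : List (List Int)) (ob : List Int) : List (Int × List Int) :=
  (PySem.List.enumerate skupine 0).filter (fun q => !PySem.Set.contains ob q.1)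

theorem enum_fst_inj (skupine : List (List Int)) {q q' : Int × List Int}
    (hq : q ∈ PySem.List.enumerate skupine 0) (hq' : q' ∈ PySem.List.enumerate skupine 0)
    (h : q.1 = q'.1) : q = q' := by
  rw [PySem.List.mem_enumerate_iff] at hq hq'
  rcases hq with ⟨a, ha, rfl⟩
  rcases hq' with ⟨b, hb, rfl⟩
  simp only [zero_add] at h ⊢
  have : a = b := by exact_mod_cast h
  subst this; rfl

theorem enum_pyGetD (skupine : List (List Int)) {q : Int × List Int}
    (hq : q ∈ PySem.List.enumerate skupine 0) :
    PySem.List.pyGetD skupine q.1 [] = q.2 := by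
  rw [PySem.List.mem_enumerate_iff] at hq
  rcases hq with ⟨a, ha, rfl⟩
  simp [PySem.List.pyGetD_natCast, ha]

theorem nodup_fst_unusedP (skupine : List (List Int)) (ob : List Int) :
    ((unusedP skupine ob).map (·.1)).Nodup := by
  have h1 : (PySem.List.enumerate skupine 0).Pairwise (fun p q => p.1 < q.1) :=
    PySem.List.pairwise_lt_enumerate ..
  have h2 : (unusedP skupine ob).Pairwise (fun p q => p.1 < q.1) :=
    List.Pairwise.sublist List.filter_sublist h1
  exact List.Pairwise.map _ (fun a b (h : a.1 < b.1) => h.ne) h2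

theorem bLoop_eq_ref (skupine : List (List Int)) :
    ∀ (preostalo : Nat) (S : PySem.Set Int) (fronta : List Int) (ob : PySem.Set Int) (k : Int),
      ob.Nodup →
      preostalo = (unusedP skupine ob).length →
      (∀ x ∈ fronta, x ∈ S) →
      (∀ q ∈ unusedP skupine ob, ∀ p ∈ q.2, p ∈ S → p ∈ fronta) →
      bLoop skupine (bIndex skupine) preostalo S fronta ob k
        = ref ((unusedP skupine ob).map (·.2)) S k := by
  intro preostalo
  induction preostalo using Nat.strong_induction_on with
  | _ preostalo ih =>
  intro S fronta ob k hnd hlen hfs hinv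
  rcases Nat.eq_zero_or_pos preostalo with rfl | hpos
  · have hU : unusedP skupine ob = [] := List.eq_nil_of_length_eq_zero hlen.symm
    rw [bLoop, hU]
    simp [ref_nil]
  · conv_lhs => rw [bLoop]
    rw [if_neg hpos.ne']
    obtain ⟨hc1, hc2, hc3⟩ := sweep_spec (fun o => (bIndex skupine).getD o []) fronta ob
      (ob, []) (by simp)
    rw [← bCollect_eq_sweep] at hc1 hc2 hc3
    simp only [List.not_mem_nil, false_or] at hc2
    set c := bCollect (bIndex skupine) fronta ob with hcdef
    have hmem : ∀ i : Int, i ∈ c.2 ↔ i ∉ ob ∧ ∃ q ∈ PySem.List.enumerate skupine 0,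
        (∃ x ∈ fronta, x ∈ q.2) ∧ i = q.1 := by
      intro i
      rw [hc2 i]
      constructor
      · rintro ⟨hio, x, hx, hd⟩
        obtain ⟨q, hq, hxq, rfl⟩ := (mem_bIndex_getD skupine x i).mp hd
        exact ⟨hio, q, hq, ⟨x, hx, hxq⟩, rfl⟩
      · rintro ⟨hio, q, hq, ⟨x, hx, hxq⟩, rfl⟩
        exact ⟨hio, x, hx, (mem_bIndex_getD skupine x q.1).mpr ⟨q, hq, hxq, rfl⟩⟩
    have hUmem : ∀ q : Int × List Int, q ∈ unusedP skupine ob ↔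
        q ∈ PySem.List.enumerate skupine 0 ∧ q.1 ∉ ob := by
      intro q
      unfold unusedP
      rw [List.mem_filter]
      constructor
      · rintro ⟨h1, h2⟩
        refine ⟨h1, fun hm => ?_⟩
        rw [(PySem.Set.contains_iff _ _).mpr hm] at h2
        simp at h2
      · rintro ⟨h1, h2⟩
        refine ⟨h1, ?_⟩
        have hcc : PySem.Set.contains ob q.1 = false := by
          cases hcc : PySem.Set.contains ob q.1
          · rfl
          · exact absurd ((PySem.Set.contains_iff _ _).mp hcc) h2
        rw [hcc]
        rfl
    have F1 : ∀ q ∈ unusedP skupine ob, (q.1 ∈ c.2 ↔ hitsB S q.2 = true) := by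
      intro q hq
      obtain ⟨hqe, hqo⟩ := (hUmem q).mp hq
      constructor
      · intro hqc
        obtain ⟨-, q', hq', ⟨x, hx, hxq⟩, hqq⟩ := (hmem q.1).mp hqc
        have hq'q : q' = q := enum_fst_inj skupine hq' hqe hqq.symm
        subst hq'q
        exact List.any_eq_true.mpr ⟨x, hxq, (PySem.Set.contains_iff _ _).mpr (hfs x hx)⟩
      · intro hhit
        obtain ⟨o, ho, hoc⟩ := List.any_eq_true.mp hhit
        have hoS : o ∈ S := (PySem.Set.contains_iff _ _).mp hoc
        exact (hmem q.1).mpr ⟨hqo, q, hqe, ⟨o, hinv q hq o ho hoS, ho⟩, rfl⟩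
    have F2 : ∀ i ∈ c.2, ∃ q ∈ unusedP skupine ob, q.1 = i := by
      intro i hi
      obtain ⟨hio, q, hq, -, rfl⟩ := (hmem i).mp hi
      exact ⟨q, (hUmem q).mpr ⟨hq, hio⟩, rfl⟩
    have hUne : unusedP skupine ob ≠ [] := by
      intro hE
      rw [hE] at hlen
      simp at hlen
      omega
    have hremne : (unusedP skupine ob).map (·.2) ≠ [] := by simp [hUne]
    have hfilmap : ∀ p : List Int → Bool,
        ((unusedP skupine ob).map (·.2)).filter p
          = ((unusedP skupine ob).filter (fun q => p q.2)).map (·.2) := by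
      intro p
      rw [List.filter_map]
      rfl
    by_cases hcnil : c.2 = []
    · rw [dif_pos hcnil]
      have hfil : (unusedP skupine ob).filter (fun q => hitsB S q.2) = [] := by
        apply List.filter_eq_nil_iff.mpr
        intro q hq hhit
        have := (F1 q hq).mpr hhit
        simp [hcnil] at this
      rw [ref_stuck _ _ _ hremne (by rw [hfilmap, hfil]; rfl)]
    · rw [dif_neg hcnil]
      obtain ⟨hs1, hs2, -⟩ := sweep_spec (fun i => PySem.List.pyGetD skupine i []) c.2 S
        (S, []) (by simp)
      rw [← bSpread_eq_sweep] at hs1 hs2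
      simp only [List.not_mem_nil, false_or] at hs2
      set sp := bSpread skupine S c.2 with hspdef
      have hc1nd : c.1.Nodup := hc3 hnd
      have hc2nd : c.2.Nodup := by
        rw [hc1] at hc1nd
        exact hc1nd.of_append_right
      rw [hc1] at hc1nd
      have hUfn : (((unusedP skupine ob).filter (fun q => hitsB S q.2)).map (·.1)).Nodup := by
        have := nodup_fst_unusedP skupine ob
        exact this.sublist (List.Sublist.map _ List.filter_sublist)
      have hperm : c.2.Perm (((unusedP skupine ob).filter (fun q => hitsB S q.2)).map (·.1)) := by
        rw [List.perm_ext_iff_of_nodup hc2nd hUfn]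
        intro i
        simp only [List.mem_map, List.mem_filter]
        constructor
        · intro hi
          obtain ⟨q, hq, rfl⟩ := F2 i hi
          exact ⟨q, ⟨hq, (F1 q hq).mp hi⟩, rfl⟩
        · rintro ⟨q, ⟨hq, hhit⟩, rfl⟩
          exact (F1 q hq).mpr hhit
      have hclen : c.2.length = ((unusedP skupine ob).filter (fun q => hitsB S q.2)).length := by
        rw [hperm.length_eq, List.length_map]
      have hU' : unusedP skupine c.1 = (unusedP skupine ob).filter (fun q => !hitsB S q.2) := by
        unfold unusedP
        rw [List.filter_filter]
        apply List.filter_congr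
        intro q hq
        rcases hob : PySem.Set.contains ob q.1 with _ | _
        · -- q unused w.r.t. ob
          have hqU : q ∈ unusedP skupine ob := by
            unfold unusedP
            rw [List.mem_filter]
            exact ⟨hq, by rw [hob]; rfl⟩
          have hbridge : PySem.Set.contains c.1 q.1 = hitsB S q.2 := by
            rw [hc1]
            rcases hhit : hitsB S q.2 with _ | _
            · have hq2 : q.1 ∉ c.2 := fun hmm => by
                have := (F1 q hqU).mp hmm
                rw [hhit] at this
                cases this
              have : q.1 ∉ ob ++ c.2 := by
                intro hmm
                rcases List.mem_append.mp hmm with hmm | hmm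
                · rw [(PySem.Set.contains_iff _ _).mpr hmm] at hob; cases hob
                · exact hq2 hmm
              cases hcc : PySem.Set.contains (ob ++ c.2) q.1
              · rfl
              · exact absurd ((PySem.Set.contains_iff _ _).mp hcc) this
            · exact (PySem.Set.contains_iff _ _).mpr
                (List.mem_append.mpr (Or.inr ((F1 q hqU).mpr hhit)))
          rw [hbridge]
          simp
        · -- q already used: both sides false
          have : PySem.Set.contains c.1 q.1 = true := by
            rw [hc1]
            exact (PySem.Set.contains_iff _ _).mpr
              (List.mem_append.mpr (Or.inl ((PySem.Set.contains_iff _ _).mp hob)))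
          rw [this]
          simp
      have hlen' : preostalo - c.2.length = (unusedP skupine c.1).length := by
        rw [hU', hclen, hlen]
        have hsplit := List.length_eq_length_filter_add
          (l := unusedP skupine ob) (fun q => hitsB S q.2)
        omega
      have hinv' : ∀ q ∈ unusedP skupine c.1, ∀ p ∈ q.2, p ∈ sp.1 → p ∈ sp.2 := by
        intro q hq p hp hps
        rw [hU'] at hq
        obtain ⟨hqU, hqnh⟩ := List.mem_filter.mp hq
        rw [hs1] at hps
        rcases List.mem_append.mp hps with hpS | hp2
        · exfalso
          have : hitsB S q.2 = true :=
            List.any_eq_true.mpr ⟨p, hp, (PySem.Set.contains_iff _ _).mpr hpS⟩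
          rw [this] at hqnh
          cases hqnh
        · exact hp2
      rw [ih (preostalo - c.2.length)
          (by have := List.length_pos_of_ne_nil hcnil; omega)
          sp.1 sp.2 c.1 (k + 1) (hc1 ▸ hc1nd) hlen'
          (fun x hx => by rw [hs1]; exact List.mem_append_right _ hx) hinv']
      have hfilne : ((unusedP skupine ob).map (·.2)).filter (hitsB S) ≠ [] := by
        obtain ⟨i, hi⟩ := List.exists_mem_of_ne_nil _ hcnil
        obtain ⟨q, hq, rfl⟩ := F2 i hi
        apply List.ne_nil_of_mem (a := q.2)
        rw [hfilmap]
        exact List.mem_map.mpr ⟨q, List.mem_filter.mpr ⟨hq, (F1 q hq).mp hi⟩, rfl⟩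
      rw [ref_step _ _ _ hremne hfilne]
      have hremeq : ((unusedP skupine ob).map (·.2)).filter (fun g => !hitsB S g)
          = (unusedP skupine c.1).map (·.2) := by
        rw [hfilmap, hU']
      rw [hremeq]
      apply ref_congr
      intro x
      rw [mem_foldl_update, hs1, List.mem_append, hs2 x]
      by_cases hxS : x ∈ S
      · simp [hxS]
      · simp only [hxS, false_or, true_and, not_false_iff]
        constructor
        · rintro ⟨i, hi, hx⟩
          obtain ⟨q, hq, rfl⟩ := F2 i hi
          have hqe : q ∈ PySem.List.enumerate skupine 0 := ((hUmem q).mp hq).1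
          refine ⟨q.2, ?_, by rwa [enum_pyGetD skupine hqe] at hx⟩
          rw [hfilmap]
          exact List.mem_map.mpr ⟨q, List.mem_filter.mpr ⟨hq, (F1 q hq).mp hi⟩, rfl⟩
        · rintro ⟨g, hg, hx⟩
          rw [hfilmap] at hg
          obtain ⟨q, hqf, rfl⟩ := List.mem_map.mp hg
          obtain ⟨hqU, hhit⟩ := List.mem_filter.mp hqf
          have hqe : q ∈ PySem.List.enumerate skupine 0 := ((hUmem q).mp hqU).1
          exact ⟨q.1, (F1 q hqU).mpr hhit, by rwa [enum_pyGetD skupine hqe]⟩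

theorem korakov_do_vseh_eq_ref (skupine : List (List Int)) (prvi : Int) :
    korakov_do_vseh skupine prvi = ref skupine (PySem.Set.ofList [prvi]) 0 := by
  unfold korakov_do_vseh
  apply aLoop_eq_ref skupine.length _ _ _ _ le_rfl
  rcases eq_or_ne skupine [] with h | h
  · exact Or.inr h
  · exact Or.inl (by exact_mod_cast (List.length_pos_of_ne_nil h).ne')

theorem korakov_do_vseh_alt_eq_ref (skupine : List (List Int)) (prvi : Int) :
    korakov_do_vseh_alt skupine prvi = ref skupine (PySem.Set.ofList [prvi]) 0 := by
  unfold korakov_do_vseh_alt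
  simp only [PySem.Set.empty]
  have h0 : unusedP skupine [] = PySem.List.enumerate skupine 0 := by
    simp [unusedP]
  have := bLoop_eq_ref skupine skupine.length (PySem.Set.ofList [prvi]) [prvi]
      [] 0 (by simp)
      (by rw [h0]; simp [PySem.List.length_enumerate])
      (by intro x hx; simpa using hx)
      (by rw [h0]; intro q _ p _ hp; simpa using hp)
  rw [this, h0, PySem.List.map_snd_enumerate]

-- ===== VERDICT (by name: the statement is the Claim_ definition above) =====
theorem korakov_do_vseh_spec : Claim_equal_korakov_do_vseh := by
  intro skupine prvi _
  unfold Spec_korakov_do_vseh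
  rw [korakov_do_vseh_eq_ref, korakov_do_vseh_alt_eq_ref]
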